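-- pv_equiv track=rewrite | github.com/nomorecoke/prediction-herobot | et_to_en.py | int_seqs_to_word_seqs
-- ===== SOURCE A (Python) =====
-- def int_seqs_to_word_seqs(int_sequences, reverse_vocab):
--     word_sequences = []
--     for int_seq in int_sequences:
--         word_seq = []
--         for idx in int_seq:
--             if idx == 0 or idx == 1:  # 0: PAD, 1: EOS
--                 break
--             if idx == 2:  # 2: UNK
--                 continue
--             word_seq.append(reverse_vocab[idx])
--         word_sequences.append(word_seq)
--     return word_sequences
-- ===== SOURCE B (Python) =====
-- def _alive_flags(seq):
--     # flags[i] is True iff no PAD/EOS token occurs strictly before position i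
--     flags = []
--     alive = True
--     for x in seq:
--         flags.append(alive)
--         alive = alive and x != 0 and x != 1
--     return flags
--
--
-- def int_seqs_to_word_seqs(int_sequences, reverse_vocab):
--     word_sequences = []
--     for seq in int_sequences:
--         flags = _alive_flags(seq)
--         word_sequences.append([reverse_vocab[x]
--                                for x, a in zip(seq, flags)
--                                if a and x not in (0, 1, 2)])
--     return word_sequences
-- ===== Notes on version B (the rewrite author's own statement) =====
-- stated objective: alternative
-- what changed: A's early-exit break/continue loop is replaced by a full-scan mask pipeline: a cumulative 'alive' flag is computed for every position (no early termination), then tokens are zipped with their flags and filter-mapped through the vocab.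
import Mathlib
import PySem

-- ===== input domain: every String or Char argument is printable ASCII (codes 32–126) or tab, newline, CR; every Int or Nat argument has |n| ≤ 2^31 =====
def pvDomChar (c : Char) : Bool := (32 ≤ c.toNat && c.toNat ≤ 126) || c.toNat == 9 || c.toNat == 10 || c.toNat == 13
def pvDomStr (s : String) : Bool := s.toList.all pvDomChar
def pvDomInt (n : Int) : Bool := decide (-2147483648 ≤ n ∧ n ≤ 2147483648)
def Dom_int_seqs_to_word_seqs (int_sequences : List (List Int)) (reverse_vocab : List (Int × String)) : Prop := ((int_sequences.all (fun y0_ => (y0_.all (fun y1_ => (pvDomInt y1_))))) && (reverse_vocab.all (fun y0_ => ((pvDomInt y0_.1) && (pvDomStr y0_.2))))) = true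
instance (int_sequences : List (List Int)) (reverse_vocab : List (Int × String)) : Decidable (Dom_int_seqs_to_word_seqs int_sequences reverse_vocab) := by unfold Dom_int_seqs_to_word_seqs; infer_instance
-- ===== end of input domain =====

-- B replaces A's early-exit break/continue loop by a full-scan mask pipeline
-- (cumulative alive flag per position, then zip + filter-map); objective: alternative.

-- ===== PORT A =====
-- dict lookup reverse_vocab[idx]: first match in the association list ("" outside Pre_, where Python raises KeyError)
def aLookup (reverse_vocab : List (Int × String)) (idx : Int) : String :=
  match reverse_vocab.find? (fun p => p.1 == idx) with
  | some p => p.2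
  | none => ""

-- the inner 'for idx in int_seq' loop with its word_seq accumulator; break / continue as in A
def aInner (reverse_vocab : List (Int × String)) : List Int → List String → List String
  | [], word_seq => word_seq
  | idx :: rest, word_seq =>
    if idx == 0 || idx == 1 then word_seq
    else if idx == 2 then aInner reverse_vocab rest word_seq
    else aInner reverse_vocab rest (word_seq ++ [aLookup reverse_vocab idx])

def int_seqs_to_word_seqs (int_sequences : List (List Int)) (reverse_vocab : List (Int × String)) : List (List String) :=
  int_sequences.foldl (fun word_sequences int_seq => word_sequences ++ [aInner reverse_vocab int_seq []]) []

-- ===== PORT B =====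
def bLookup (reverse_vocab : List (Int × String)) (idx : Int) : String :=
  match reverse_vocab.find? (fun p => p.1 == idx) with
  | some p => p.2
  | none => ""

-- _alive_flags: the loop appending the running 'alive' flag for every position
def bAliveFlags (seq : List Int) : List Bool :=
  (seq.foldl (fun (p : Bool × List Bool) x =>
      (p.1 && !(x == 0) && !(x == 1), p.2 ++ [p.1])) (true, [])).2

def int_seqs_to_word_seqs_alt (int_sequences : List (List Int)) (reverse_vocab : List (Int × String)) : List (List String) :=
  int_sequences.foldl (fun word_sequences seq =>
    word_sequences ++
      [((seq.zip (bAliveFlags seq)).filter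
          (fun q => q.2 && !(q.1 == 0) && !(q.1 == 1) && !(q.1 == 2))).map
        (fun q => bLookup reverse_vocab q.1)]) []

-- ===== PRECONDITION & SPEC =====
-- Pre_ excludes exactly the inputs on which A raises KeyError: some index reached
-- before the first PAD/EOS token, other than UNK, is missing from reverse_vocab.
def Pre_int_seqs_to_word_seqs (int_sequences : List (List Int)) (reverse_vocab : List (Int × String)) : Prop :=
  ∀ s ∈ int_sequences, ∀ i ∈ (s.takeWhile (fun x => !(x == 0 || x == 1))).filter (fun x => !(x == 2)),
    (reverse_vocab.find? (fun p => p.1 == i)).isSome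
instance (int_sequences : List (List Int)) (reverse_vocab : List (Int × String)) : Decidable (Pre_int_seqs_to_word_seqs int_sequences reverse_vocab) := by unfold Pre_int_seqs_to_word_seqs; infer_instance
def pvWitness_int_seqs_to_word_seqs : List (List Int) × (List (Int × String)) :=
  ([[3, 2, 4, 0, 9], [4], []], [(3, "the"), (4, "cat")])
def Spec_int_seqs_to_word_seqs (int_sequences : List (List Int)) (reverse_vocab : List (Int × String)) (out : List (List String)) : Prop := out = int_seqs_to_word_seqs_alt int_sequences reverse_vocab
instance (int_sequences : List (List Int)) (reverse_vocab : List (Int × String)) (out : List (List String)) : Decidable (Spec_int_seqs_to_word_seqs int_sequences reverse_vocab out) := by unfold Spec_int_seqs_to_word_seqs; infer_instance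

-- ===== CLAIM (what is proved, stated in full; the proofs are below) =====
def Claim_equal_int_seqs_to_word_seqs : Prop := ∀ (int_sequences : List (List Int)) (reverse_vocab : List (Int × String)), Dom_int_seqs_to_word_seqs int_sequences reverse_vocab → Pre_int_seqs_to_word_seqs int_sequences reverse_vocab → Spec_int_seqs_to_word_seqs int_sequences reverse_vocab (int_seqs_to_word_seqs int_sequences reverse_vocab)

-- ===== LEMMAS AND PROOFS =====

-- recursive characterisation of the alive-flag list for a given starting flag
def flagsRec : Bool → List Int → List Bool
  | _, [] => []
  | a, x :: t => a :: flagsRec (a && !(x == 0) && !(x == 1)) t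

theorem bAliveFlags_foldl (seq : List Int) (a : Bool) (acc : List Bool) :
    (seq.foldl (fun (p : Bool × List Bool) x =>
        (p.1 && !(x == 0) && !(x == 1), p.2 ++ [p.1])) (a, acc)).2
      = acc ++ flagsRec a seq := by
  induction seq generalizing a acc with
  | nil => simp [flagsRec]
  | cons x t ih => simp [List.foldl, flagsRec, ih]

theorem bAliveFlags_eq (seq : List Int) : bAliveFlags seq = flagsRec true seq := by
  simpa using bAliveFlags_foldl seq true []

-- once the flag is false, nothing survives the filter
theorem filter_flags_false (seq : List Int) :
    (seq.zip (flagsRec false seq)).filter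
      (fun q => q.2 && !(q.1 == 0) && !(q.1 == 1) && !(q.1 == 2)) = [] := by
  induction seq with
  | nil => rfl
  | cons x t ih =>
    have h : flagsRec false (x :: t) = false :: flagsRec false t := by simp [flagsRec]
    rw [h, List.zip_cons_cons, List.filter_cons]
    simpa using ih

-- the masked filter-map equals the filtered takeWhile prefix, mapped
theorem bInner_eq (rv : List (Int × String)) (seq : List Int) :
    ((seq.zip (flagsRec true seq)).filter
        (fun q => q.2 && !(q.1 == 0) && !(q.1 == 1) && !(q.1 == 2))).map
      (fun q => bLookup rv q.1)
    = ((seq.takeWhile (fun x => !(x == 0 || x == 1))).filter (fun x => !(x == 2))).map (bLookup rv) := by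
  induction seq with
  | nil => rfl
  | cons x t ih =>
    by_cases h0 : (x == 0) = true
    · simp [flagsRec, List.takeWhile, h0, filter_flags_false]
    · by_cases h1 : (x == 1) = true
      · simp [flagsRec, List.takeWhile, h0, h1, filter_flags_false]
      · by_cases h2 : (x == 2) = true
        · simp [flagsRec, List.takeWhile, h0, h1, h2, ih]
        · simp [flagsRec, List.takeWhile, h0, h1, h2, ih]

-- A's inner loop computes acc ++ the filtered-mapped takeWhile prefix
theorem aInner_eq (rv : List (Int × String)) (s : List Int) (acc : List String) :
    aInner rv s acc =
      acc ++ ((s.takeWhile (fun x => !(x == 0 || x == 1))).filter (fun x => !(x == 2))).map (bLookup rv) := by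
  induction s generalizing acc with
  | nil => simp [aInner]
  | cons a t ih =>
    by_cases h0 : (a == 0 || a == 1) = true
    · simp [aInner, h0, List.takeWhile]
    · simp only [Bool.not_eq_true] at h0
      by_cases h2 : (a == 2) = true
      · have : (a == 0 || a == 1) = false := h0
        simp [aInner, this, h2, List.takeWhile, ih]
      · simp only [Bool.not_eq_true] at h2
        simp [aInner, h0, h2, List.takeWhile, ih, aLookup, bLookup]

theorem foldl_append_singleton {α β : Type} (g : α → β) (l : List α) (acc : List β) :
    l.foldl (fun ws s => ws ++ [g s]) acc = acc ++ l.map g := by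
  induction l generalizing acc with
  | nil => simp
  | cons a t ih => simp [List.foldl, ih]

-- ===== VERDICT (by name: the statement is the Claim_ definition above) =====
theorem int_seqs_to_word_seqs_spec : Claim_equal_int_seqs_to_word_seqs := by
  intro seqs rv _ _
  show _ = _
  unfold int_seqs_to_word_seqs int_seqs_to_word_seqs_alt
  simp only [foldl_append_singleton, List.nil_append]
  apply List.map_congr_left
  intro s _
  rw [aInner_eq, bAliveFlags_eq, bInner_eq, List.nil_append]
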